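-- pv_equiv track=rewrite | github.com/helenagraeml/pne-studentslab | P00/Seq0.py | seq_count_base
-- ===== SOURCE A (Python) =====
-- def seq_count_base(seq, base):
--     seq = seq.split("\n")
--     seq = seq[1:]
--     seq = "".join(seq)
--     for i in seq:
--         if i in base:
--             base[i] += 1
--     return base
-- ===== SOURCE B (Python) =====
-- def seq_count_base(seq, base):
--     # Note: like A, mutates `base` in place and returns it.
--     body = "".join(seq.split("\n")[1:])
--     counts = {}
--     for ch in body:
--         counts[ch] = counts.get(ch, 0) + 1
--     for k in base:
--         base[k] += counts.get(k, 0)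
--     return base
-- ===== Notes on version B (the rewrite author's own statement) =====
-- stated objective: alternative
-- what changed: Instead of testing dict membership and bumping base once per body character, B builds a character frequency table in one pass over the body and then makes a single pass over base's keys adding each key's precomputed count.
import Mathlib
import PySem

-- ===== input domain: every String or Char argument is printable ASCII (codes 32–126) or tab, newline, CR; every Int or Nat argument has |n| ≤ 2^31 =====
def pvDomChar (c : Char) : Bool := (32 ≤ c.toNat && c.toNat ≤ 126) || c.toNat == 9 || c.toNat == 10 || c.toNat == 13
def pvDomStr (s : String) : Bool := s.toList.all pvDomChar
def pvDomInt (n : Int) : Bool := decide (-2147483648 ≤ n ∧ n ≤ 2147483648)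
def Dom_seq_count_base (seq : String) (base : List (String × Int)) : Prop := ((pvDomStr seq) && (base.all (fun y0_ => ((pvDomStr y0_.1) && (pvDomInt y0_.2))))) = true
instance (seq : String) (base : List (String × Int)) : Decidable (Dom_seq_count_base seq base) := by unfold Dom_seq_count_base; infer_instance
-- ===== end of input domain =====

-- B replaces A's per-character membership-test-and-bump loop by a one-pass frequency
-- table then a single pass over base's keys (alternative decomposition; like A, the
-- Python B mutates `base` in place — the equivalence proved here is about the return value).


-- ===== PORT A =====
-- `base[i] += 1` on the dict-as-association-list: bump the first pair whose key is s
def pvBump : List (String × Int) → String → List (String × Int)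
  | [], _ => []
  | (k, v) :: rest, s => if k = s then (k, v + 1) :: rest else (k, v) :: pvBump rest s

def seq_count_base (seq : String) (base : List (String × Int)) : List (String × Int) :=
  -- splitOn is PySem's sep ≠ "" form of str.split; exact for the literal "\n"
  let parts := PySem.Chars.splitOn seq.toList ['\n']   -- seq = seq.split("\n")
  let parts := PySem.List.slice parts (some 1) none     -- seq = seq[1:]
  let body := PySem.Chars.join [] parts                 -- seq = "".join(seq)
  body.foldl (fun d c =>                   -- for i in seq:
    if d.any (fun p => p.1 == String.singleton c)  --   if i in base:
    then pvBump d (String.singleton c)             --     base[i] += 1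
    else d) base

-- ===== PORT B =====
def seq_count_base_alt (seq : String) (base : List (String × Int)) : List (String × Int) :=
  let parts := PySem.Chars.splitOn seq.toList ['\n']
  let parts := PySem.List.slice parts (some 1) none
  let body := PySem.Chars.join [] parts          -- body = "".join(seq.split("\n")[1:])
  -- counts = {}; for ch in body: counts[ch] = counts.get(ch, 0) + 1
  let counts : PySem.Dict String Int :=
    body.foldl (fun d c =>
      let ch := String.singleton c
      d.insert ch (d.getD ch 0 + 1)) PySem.Dict.empty
  -- for k in base: base[k] += counts.get(k, 0)
  base.map (fun p => (p.1, p.2 + counts.getD p.1 0))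

-- ===== PRECONDITION & SPEC =====
-- Pre_ requires the association list's keys to be pairwise distinct: a Python dict can
-- never contain duplicate keys, so lists with duplicates represent no Python input;
-- on them the assoc-list ports' first-match behaviour would be accidental.
def Pre_seq_count_base (seq : String) (base : List (String × Int)) : Prop :=
  (base.map Prod.fst).Nodup
instance (seq : String) (base : List (String × Int)) : Decidable (Pre_seq_count_base seq base) := by
  unfold Pre_seq_count_base; infer_instance

def pvWitness_seq_count_base : String × (List (String × Int)) :=
  (">h1\nGATTACA\nCC", [("A", 0), ("C", 0), ("G", 0), ("T", 0)])

def Spec_seq_count_base (seq : String) (base : List (String × Int)) (out : List (String × Int)) : Prop := out = seq_count_base_alt seq base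
instance (seq : String) (base : List (String × Int)) (out : List (String × Int)) : Decidable (Spec_seq_count_base seq base out) := by unfold Spec_seq_count_base; infer_instance

-- ===== CLAIM (what is proved, stated in full; the proofs are below) =====
def Claim_equal_seq_count_base : Prop := ∀ (seq : String) (base : List (String × Int)), Dom_seq_count_base seq base → Pre_seq_count_base seq base → Spec_seq_count_base seq base (seq_count_base seq base)

-- ===== LEMMAS AND PROOFS =====

lemma pvBump_of_not_mem (d : List (String × Int)) (s : String)
    (h : s ∉ d.map Prod.fst) : pvBump d s = d := by
  induction d with
  | nil => rfl
  | cons p rest ih =>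
    obtain ⟨k, v⟩ := p
    simp only [List.map_cons, List.mem_cons, not_or] at h
    have hks : ¬ k = s := fun he => h.1 he.symm
    simp [pvBump, hks, ih h.2]

lemma pvBump_keys (d : List (String × Int)) (s : String) :
    (pvBump d s).map Prod.fst = d.map Prod.fst := by
  induction d with
  | nil => rfl
  | cons p rest ih =>
    obtain ⟨k, v⟩ := p
    by_cases hk : k = s <;> simp [pvBump, hk, ih]

-- A's one step (membership test then bump) is just pvBump
lemma pvStep_eq_bump (d : List (String × Int)) (s : String) :
    (if d.any (fun p => p.1 == s) then pvBump d s else d) = pvBump d s := by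
  by_cases h : s ∈ d.map Prod.fst
  · have hb : d.any (fun p => p.1 == s) = true := by
      simp only [List.any_eq_true, beq_iff_eq]
      obtain ⟨q, hq, hqs⟩ := List.mem_map.mp h
      exact ⟨q, hq, hqs⟩
    rw [if_pos hb]
  · rw [pvBump_of_not_mem d s h]
    split <;> rfl

-- mapping "add f of the key" over a bump, with distinct keys, adds one at s
lemma pvMap_bump (d : List (String × Int)) (s : String) (f : String → Int)
    (h : (d.map Prod.fst).Nodup) :
    (pvBump d s).map (fun p => (p.1, p.2 + f p.1)) =
      d.map (fun p => (p.1, p.2 + (f p.1 + if p.1 = s then 1 else 0))) := by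
  induction d with
  | nil => rfl
  | cons p rest ih =>
    obtain ⟨k, v⟩ := p
    simp only [List.map_cons, List.nodup_cons] at h
    by_cases hk : k = s
    · subst hk
      have htail : List.map (fun p => (p.1, p.2 + f p.1)) rest =
          List.map (fun p => (p.1, p.2 + (f p.1 + if p.1 = k then 1 else 0))) rest := by
        apply List.map_congr_left
        intro q hq
        have hne : ¬ q.1 = k := fun he => h.1 (he ▸ List.mem_map_of_mem hq)
        simp [hne]
      rw [show pvBump ((k, v) :: rest) k = (k, v + 1) :: rest from by simp [pvBump]]
      rw [List.map_cons, List.map_cons, htail]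
      congr 1
      rw [Prod.mk.injEq]
      refine ⟨rfl, ?_⟩
      have hone : (if k = k then (1 : Int) else 0) = 1 := by simp
      rw [hone]
      ring
    · simp only [pvBump, if_neg hk, List.map_cons, add_zero]
      rw [ih h.2]

-- A's loop over the body characters = add each key's count among the singletons
lemma pvFold_eq_map_count (cs : List Char) (d : List (String × Int))
    (h : (d.map Prod.fst).Nodup) :
    cs.foldl (fun d c =>
        if d.any (fun p => p.1 == String.singleton c)
        then pvBump d (String.singleton c) else d) d =
      d.map (fun p => (p.1, p.2 + ((cs.map String.singleton).count p.1 : Int))) := by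
  induction cs generalizing d with
  | nil =>
    rw [List.foldl_nil]
    simp
  | cons c cs ih =>
    rw [List.foldl_cons, pvStep_eq_bump]
    rw [ih _ (by rw [pvBump_keys]; exact h)]
    rw [pvMap_bump d (String.singleton c)
      (fun k => ((cs.map String.singleton).count k : Int)) h]
    apply List.map_congr_left
    intro p _
    have hcnt : ((String.singleton c :: cs.map String.singleton).count p.1 : Int) =
        ((cs.map String.singleton).count p.1 : Int) + if p.1 = String.singleton c then 1 else 0 := by
      rw [List.count_cons]
      by_cases hp : p.1 = String.singleton c
      · simp [hp]
      · simp [hp, Ne.symm hp]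
    simp [hcnt]

-- B's counting dict looks up to the same count
lemma pvCounts_getD (cs : List Char) (k : String) :
    (cs.foldl (fun d c =>
        let ch := String.singleton c
        d.insert ch (d.getD ch 0 + 1)) (PySem.Dict.empty : PySem.Dict String Int)).getD k 0 =
      ((cs.map String.singleton).count k : Int) := by
  have : cs.foldl (fun d c =>
      let ch := String.singleton c
      d.insert ch (d.getD ch 0 + 1)) (PySem.Dict.empty : PySem.Dict String Int) =
      (cs.map String.singleton).foldl
        (fun d x => d.insert x (d.getD x 0 + 1)) PySem.Dict.empty := by
    rw [List.foldl_map]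
  rw [this, PySem.Dict.getD_foldl_insert_add_one]
  simp

-- ===== VERDICT (by name: the statement is the Claim_ definition above) =====
theorem seq_count_base_spec : Claim_equal_seq_count_base := by
  intro seq base _ hpre
  unfold Spec_seq_count_base seq_count_base seq_count_base_alt
  rw [pvFold_eq_map_count _ _ hpre]
  apply List.map_congr_left
  intro p _
  rw [pvCounts_getD]
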